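-- pv_equiv track=rewrite | github.com/jb3dahmen/indirectsupervision | getAnomalyFeatures.py | getNightBathroomEntryCountSliding
-- ===== SOURCE A (Python) =====
-- def getNightBathroomEntryCountSliding(window):
--     startflag = 0
--     entrycount = 0
--     for i in range(len(window)):
--         if(int(window[i]) == 1 and startflag == 0):
--             startflag = 1
--             entrycount += 1
--         if(int(window[i]) != 1):
--             startflag = 0
--
--     return entrycount
-- ===== SOURCE B (Python) =====
-- def getNightBathroomEntryCountSliding(window):
--     # groupby-style: partition the boolean stream into maximal runs of equal
--     # values and count the runs that are runs of 1s.
--     flags = [int(x) == 1 for x in window]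
--     n = len(flags)
--     count = 0
--     i = 0
--     while i < n:
--         run = flags[i]
--         j = i + 1
--         while j < n and flags[j] == run:
--             j += 1
--         if run:
--             count += 1
--         i = j
--     return count
-- ===== Notes on version B (the rewrite author's own statement) =====
-- stated objective: alternative
-- what changed: Replaces the per-element startflag state machine with a groupby-style run decomposition: the window is mapped to booleans once, then an outer loop jumps run-by-run (an inner scan finds each maximal run of equal values) and counts the runs of 1s.
import Mathlib
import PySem

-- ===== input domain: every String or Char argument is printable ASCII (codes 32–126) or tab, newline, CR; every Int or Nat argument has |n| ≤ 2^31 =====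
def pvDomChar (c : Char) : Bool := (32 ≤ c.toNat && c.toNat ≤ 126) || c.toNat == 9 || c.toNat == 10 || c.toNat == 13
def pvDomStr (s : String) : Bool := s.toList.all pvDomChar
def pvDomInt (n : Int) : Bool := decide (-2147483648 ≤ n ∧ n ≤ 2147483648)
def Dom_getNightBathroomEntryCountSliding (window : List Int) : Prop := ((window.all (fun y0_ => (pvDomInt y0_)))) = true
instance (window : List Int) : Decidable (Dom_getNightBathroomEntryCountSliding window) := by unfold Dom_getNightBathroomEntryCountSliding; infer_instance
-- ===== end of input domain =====

-- B replaces A's per-element startflag state machine by a groupby-style run decomposition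
-- (skip each maximal run of equal booleans at once, count the runs of 1s); objective: alternative.

-- ===== PORT A =====
-- A's loop body: two sequential ifs updating (startflag, entrycount).
def getNightBathroomEntryCountSliding (window : List Int) : Int :=
  (window.foldl
    (fun (st : Int × Int) x =>
      let st := if x == 1 && st.1 == 0 then (1, st.2 + 1) else st
      if x != 1 then (0, st.2) else st)
    (0, 0)).2

-- ===== PORT B =====
-- B's outer loop: take the head run's value, skip its maximal run (the inner scan), recurse.
def pvRunCount : List Bool → Int
  | [] => 0
  | f :: rest => (if f then 1 else 0) + pvRunCount (rest.dropWhile (· == f))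
termination_by l => l.length
decreasing_by
  exact Nat.lt_succ_of_le (List.length_dropWhile_le (· == f) rest)

def getNightBathroomEntryCountSliding_alt (window : List Int) : Int :=
  pvRunCount (window.map (fun x => x == 1))

-- ===== PRECONDITION & SPEC =====
def Spec_getNightBathroomEntryCountSliding (window : List Int) (out : Int) : Prop := out = getNightBathroomEntryCountSliding_alt window
instance (window : List Int) (out : Int) : Decidable (Spec_getNightBathroomEntryCountSliding window out) := by unfold Spec_getNightBathroomEntryCountSliding; infer_instance

-- ===== CLAIM (what is proved, stated in full; the proofs are below) =====
def Claim_equal_getNightBathroomEntryCountSliding : Prop := ∀ (window : List Int), Dom_getNightBathroomEntryCountSliding window → Spec_getNightBathroomEntryCountSliding window (getNightBathroomEntryCountSliding window)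

-- ===== LEMMAS AND PROOFS =====

@[simp] theorem pvRunCount_nil : pvRunCount [] = 0 := by rw [pvRunCount]

@[simp] theorem pvRunCount_cons (f : Bool) (rest : List Bool) :
    pvRunCount (f :: rest) = (if f then 1 else 0) + pvRunCount (rest.dropWhile (· == f)) := by
  rw [pvRunCount]

-- A leading run of `false` contributes nothing.
theorem pvRunCount_dropFalse (l : List Bool) :
    pvRunCount (l.dropWhile (fun x => !x)) = pvRunCount l := by
  cases l with
  | nil => simp
  | cons f rest =>
    cases f with
    | true => simp
    | false => simp

-- Invariant: A's fold from flag `if prev then 1 else 0`, count `c`, equals `c` plus the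
-- run count of the flags, with the leading run of trues skipped when prev = true.
theorem pv_loop_eq (l : List Int) (prev : Bool) (c : Int) :
    (l.foldl
      (fun (st : Int × Int) x =>
        let st := if x == 1 && st.1 == 0 then (1, st.2 + 1) else st
        if x != 1 then (0, st.2) else st)
      ((if prev then (1 : Int) else 0), c)).2
    = c + pvRunCount (if prev then (l.map (fun x => x == 1)).dropWhile (fun x => x)
                      else l.map (fun x => x == 1)) := by
  induction l generalizing prev c with
  | nil => cases prev <;> simp
  | cons x xs ih =>
    rw [List.foldl_cons]
    by_cases hx : x = 1 <;> cases prev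
    · -- prev = false, x = 1 : count, flag set; new head run of trues skipped
      have h := ih true (c + 1)
      simp [hx] at h ⊢
      rw [h]; ring
    · -- prev = true, x = 1 : nothing happens, leading-true run extends
      have h := ih true c
      simp [hx] at h ⊢
      exact h
    · -- prev = true, x ≠ 1 : flag cleared
      have hx' : (x == 1) = false := by simp [hx]
      have h := ih false c
      simp [hx, hx'] at h ⊢
      rw [h, pvRunCount_dropFalse (xs.map (fun x => x == 1))]
    · -- prev = false, x ≠ 1
      have hx' : (x == 1) = false := by simp [hx]
      have h := ih false c
      simp [hx, hx'] at h ⊢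
      rw [h, pvRunCount_dropFalse (xs.map (fun x => x == 1))]

-- ===== VERDICT (by name: the statement is the Claim_ definition above) =====
theorem getNightBathroomEntryCountSliding_spec : Claim_equal_getNightBathroomEntryCountSliding := by
  intro window _
  unfold Spec_getNightBathroomEntryCountSliding getNightBathroomEntryCountSliding getNightBathroomEntryCountSliding_alt
  simpa using pv_loop_eq window false 0
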